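-- pv_equiv track=rewrite | github.com/ColinX1997/Fast-Code-Updater | component-code-updater/Tests/3-download.py | find_updates
-- ===== SOURCE A (Python) =====
-- def find_updates(local_files, remote_files):
--     # 找到需要更新的文件
--     updates = []
--     for local_file in local_files:
--         base_name = local_file.split("-")[0]
--         remote_file = next((f for f in remote_files if f.startswith(base_name)), None)
--         if remote_file and local_file != str(remote_file).replace(".rpm", ""):
--             updates.append((local_file, remote_file))
--
--     return updates
-- ===== SOURCE B (Python) =====
-- def find_updates(local_files, remote_files):
--     # one pass per remote over a shrinking pending set of distinct base names,
--     # instead of scanning remote_files once per local file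
--     pending = list(dict.fromkeys(lf.split("-")[0] for lf in local_files))
--     match = {}
--     for r in remote_files:
--         if not pending:
--             break
--         rest = []
--         for b in pending:
--             if r.startswith(b):
--                 match[b] = r
--             else:
--                 rest.append(b)
--         pending = rest
--     updates = []
--     for lf in local_files:
--         r = match.get(lf.split("-")[0])
--         if r and lf != r.replace(".rpm", ""):
--             updates.append((lf, r))
--     return updates
-- ===== Notes on version B (the rewrite author's own statement) =====
-- stated objective: alternative
-- what changed: Instead of scanning remote_files once per local file, B dedups the base names once and makes one pass over remote_files with a shrinking pending set, recording the first matching remote per base in a dict; the output pass is a dict lookup per local file.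
import Mathlib
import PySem

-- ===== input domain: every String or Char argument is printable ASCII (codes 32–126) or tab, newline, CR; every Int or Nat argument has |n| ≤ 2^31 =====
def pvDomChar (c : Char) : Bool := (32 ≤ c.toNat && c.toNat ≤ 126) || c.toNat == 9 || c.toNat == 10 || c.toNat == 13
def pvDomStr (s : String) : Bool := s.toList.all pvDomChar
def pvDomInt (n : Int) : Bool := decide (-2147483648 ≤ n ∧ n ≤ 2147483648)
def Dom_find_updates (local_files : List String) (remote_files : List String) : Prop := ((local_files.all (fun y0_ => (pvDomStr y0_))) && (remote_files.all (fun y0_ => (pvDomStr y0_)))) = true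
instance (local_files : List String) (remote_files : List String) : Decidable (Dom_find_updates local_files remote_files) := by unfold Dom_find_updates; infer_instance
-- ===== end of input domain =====

-- B builds the base→first-matching-remote map in one pass over remote_files with a shrinking
-- pending list, instead of A's scan of remote_files per local file (objective: alternative).

-- ===== PORT A =====
-- shared helper: local_file.split("-")[0] (split with a non-empty separator is never empty, so [0] is total)
def pvBase (s : String) : String := ((PySem.Str.split? s "-").getD []).headD ""

def find_updates (local_files : List String) (remote_files : List String) : List (String × String) :=
  local_files.foldl (fun updates lf =>
    let base_name := pvBase lf
    match remote_files.find? (fun f => PySem.Str.startswith f base_name) with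
    | none => updates
    | some r =>
        if r ≠ "" ∧ lf ≠ PySem.Str.replace r ".rpm" "" then updates ++ [(lf, r)]
        else updates) []

-- ===== PORT B =====
-- the body of 'for b in pending': record a match, or keep b pending
def pvAltStep (r : String) (st : PySem.Dict String String × List String) (b : String) :
    PySem.Dict String String × List String :=
  if PySem.Str.startswith r b then (st.1.insert b r, st.2) else (st.1, st.2 ++ [b])

-- the 'for r in remote_files' loop with its early break on empty pending
def pvAltLoop : List String → List String → PySem.Dict String String → PySem.Dict String String
  | [], _, m => m
  | r :: rs, pending, m =>
    if pending.isEmpty then m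
    else
      let st := pending.foldl (pvAltStep r) (m, [])
      pvAltLoop rs st.2 st.1

def find_updates_alt (local_files : List String) (remote_files : List String) : List (String × String) :=
  let pending := PySem.List.dedup (local_files.map pvBase)
  let md := pvAltLoop remote_files pending PySem.Dict.empty
  local_files.foldl (fun updates lf =>
    match md.get? (pvBase lf) with
    | none => updates
    | some r =>
        if r ≠ "" ∧ lf ≠ PySem.Str.replace r ".rpm" "" then updates ++ [(lf, r)]
        else updates) []

-- ===== PRECONDITION & SPEC =====
def Spec_find_updates (local_files : List String) (remote_files : List String) (out : List (String × String)) : Prop := out = find_updates_alt local_files remote_files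
instance (local_files : List String) (remote_files : List String) (out : List (String × String)) : Decidable (Spec_find_updates local_files remote_files out) := by unfold Spec_find_updates; infer_instance

-- ===== CLAIM (what is proved, stated in full; the proofs are below) =====
def Claim_equal_find_updates : Prop := ∀ (local_files : List String) (remote_files : List String), Dom_find_updates local_files remote_files → Spec_find_updates local_files remote_files (find_updates local_files remote_files)

-- ===== LEMMAS AND PROOFS =====

-- the inner fold keeps exactly the non-matching bases pending
lemma pvAltStep_snd (r : String) (p : List String) (m : PySem.Dict String String) (acc : List String) :
    (p.foldl (pvAltStep r) (m, acc)).2 = acc ++ p.filter (fun b => !PySem.Str.startswith r b) := by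
  induction p generalizing m acc with
  | nil => simp
  | cons b p ih =>
    simp only [List.foldl_cons, pvAltStep, List.filter_cons, PySem.Str.startswith_eq] at *
    by_cases h : PySem.Chars.startswith r.toList b.toList = true
    · simp [h, ih]
    · simp [h, ih]

-- the inner fold records r for exactly the pending bases that r starts with
lemma pvAltStep_fst (r : String) (p : List String) (m : PySem.Dict String String) (acc : List String) (x : String) :
    ((p.foldl (pvAltStep r) (m, acc)).1).get? x =
      if x ∈ p ∧ PySem.Str.startswith r x = true then some r else m.get? x := by
  induction p generalizing m acc with
  | nil => simp
  | cons b p ih =>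
    simp only [List.foldl_cons, pvAltStep, PySem.Str.startswith_eq] at *
    by_cases h : PySem.Chars.startswith r.toList b.toList = true
    · rw [if_pos h, ih, PySem.Dict.get?_insert]
      by_cases hbx : x = b
      · subst hbx
        simp [h, List.mem_cons]
      · simp [hbx, List.mem_cons]
    · rw [if_neg h, ih]
      have hb : ¬(x = b ∧ PySem.Chars.startswith r.toList x.toList = true) := by
        rintro ⟨rfl, hs⟩; exact h hs
      by_cases hx : x ∈ p ∧ PySem.Chars.startswith r.toList x.toList = true
      · simp [hx, List.mem_cons]
      · have hc : ¬((x = b ∨ x ∈ p) ∧ PySem.Chars.startswith r.toList x.toList = true) := by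
          rintro ⟨h1 | h1, hs⟩
          · exact hb ⟨h1, hs⟩
          · exact hx ⟨h1, hs⟩
        simp [hx, hc, List.mem_cons]

-- the outer loop computes, for every base still pending, the FIRST matching remote
lemma pvAltLoop_get? (rs : List String) (p : List String) (m : PySem.Dict String String) (x : String) :
    (pvAltLoop rs p m).get? x =
      if x ∈ p then
        (match rs.find? (fun r => PySem.Str.startswith r x) with
         | some r => some r
         | none => m.get? x)
      else m.get? x := by
  induction rs generalizing p m with
  | nil => simp [pvAltLoop]
  | cons r rs ih =>
    simp only [pvAltLoop]
    by_cases hp : p.isEmpty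
    · have hpe : p = [] := List.isEmpty_iff.1 hp
      subst hpe; simp
    · rw [if_neg (by simp [hp])]
      rw [ih, pvAltStep_snd, pvAltStep_fst]
      simp only [List.nil_append, PySem.Str.startswith_eq]
      by_cases hs : PySem.Chars.startswith r.toList x.toList = true
      · rw [List.find?_cons_of_pos (h := by simpa using hs)]
        have hnf : x ∉ p.filter (fun b => !PySem.Chars.startswith r.toList b.toList) := by
          simp [List.mem_filter, hs]
        by_cases hx : x ∈ p
        · simp [hnf, hx, hs]
        · simp [hnf, hx]
      · rw [List.find?_cons_of_neg (h := by simpa using hs)]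
        have hmem : (x ∈ p.filter (fun b => !PySem.Chars.startswith r.toList b.toList)) ↔ x ∈ p := by
          simp [List.mem_filter, hs]
        by_cases hx : x ∈ p
        · cases hfind : rs.find? (fun r => PySem.Str.startswith r x) with
          | none => simp [hmem, hx, hs]
          | some r' => simp [hmem, hx, hs]
        · simp [hmem, hx]

-- B's dict lookup equals A's linear scan, for every local file's base
lemma md_get (local_files remote_files : List String) (lf : String) (hlf : lf ∈ local_files) :
    (pvAltLoop remote_files (PySem.List.dedup (local_files.map pvBase)) PySem.Dict.empty).get? (pvBase lf)
      = remote_files.find? (fun f => PySem.Str.startswith f (pvBase lf)) := by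
  have hm : pvBase lf ∈ PySem.List.dedup (local_files.map pvBase) := by
    rw [PySem.List.mem_dedup]
    exact List.mem_map.2 ⟨lf, hlf, rfl⟩
  rw [pvAltLoop_get?, if_pos hm]
  cases remote_files.find? (fun f => PySem.Str.startswith f (pvBase lf)) with
  | none => simp [PySem.Dict.get?_empty]
  | some r => rfl

-- ===== VERDICT (by name: the statement is the Claim_ definition above) =====
theorem find_updates_spec : Claim_equal_find_updates := by
  intro local_files remote_files _
  unfold Spec_find_updates find_updates find_updates_alt
  refine PySem.List.foldl_congr_mem' local_files _ _ [] ?_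
  intro lf hlf updates
  rw [md_get local_files remote_files lf hlf]
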